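-- pv_equiv track=rewrite | github.com/Cybrite/Pythn | jobAssign.py | recommend_job
-- ===== SOURCE A (Python) =====
-- def recommend_job(user_skills, job_data):
--     match_scores = {}
--     for role, skills_required in job_data.items():
--         match_count = len(user_skills & skills_required)
--         match_scores[role] = match_count
--
--     best_match = max(match_scores, key=match_scores.get)
--     if match_scores[best_match] == 0:
--         return None, 0
--     return best_match, match_scores[best_match]
-- ===== SOURCE B (Python) =====
-- def recommend_job(user_skills, job_data):
--     best_role = None
--     best_count = 0
--     for role, skills_required in job_data.items():
--         match_count = len(user_skills & skills_required)
--         if match_count > best_count: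
--             best_role = role
--             best_count = match_count
--     return best_role, best_count
-- ===== Notes on version B (the rewrite author's own statement) =====
-- stated objective: simpler
-- what changed: Replaces the build-a-score-dict-then-max(key=get)-then-lookup pipeline with a single pass that keeps the best role and count, updating only on strictly greater counts so ties keep the first-inserted role, and naturally yielding (None, 0) when no skill matches. (On the excluded empty job_data A raises ValueError while B returns (None, 0).)
import Mathlib
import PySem

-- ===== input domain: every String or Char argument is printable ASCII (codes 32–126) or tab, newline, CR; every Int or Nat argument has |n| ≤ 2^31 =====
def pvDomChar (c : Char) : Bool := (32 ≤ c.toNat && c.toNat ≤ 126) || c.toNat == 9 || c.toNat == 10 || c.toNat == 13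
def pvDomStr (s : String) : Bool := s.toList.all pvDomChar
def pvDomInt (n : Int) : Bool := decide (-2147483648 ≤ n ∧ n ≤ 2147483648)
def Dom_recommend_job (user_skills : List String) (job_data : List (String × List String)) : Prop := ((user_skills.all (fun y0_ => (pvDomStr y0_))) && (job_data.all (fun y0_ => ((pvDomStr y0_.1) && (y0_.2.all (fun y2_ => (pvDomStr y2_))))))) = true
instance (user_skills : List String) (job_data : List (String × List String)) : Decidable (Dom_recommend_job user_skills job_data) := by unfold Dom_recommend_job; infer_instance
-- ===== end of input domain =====

-- B replaces A's dict-then-max(key=get)-then-lookup pipeline by one strict-greater pass; equal return values on non-empty dicts.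

-- ===== PORT A =====
def recommend_job (user_skills : List String) (job_data : List (String × List String)) : Option String × Int :=
  let match_scores : PySem.Dict String Int :=
    job_data.foldl (fun d p => d.insert p.1 (PySem.Set.len (PySem.Set.inter user_skills p.2))) PySem.Dict.empty
  match PySem.List.max? match_scores.keys (fun k => match_scores.getD k 0) with
  | none => (none, 0)  -- unreachable under Pre_: Python's max raises ValueError on the empty dict
  | some best_match =>
    -- match_scores[best_match]: best_match is a key of match_scores, so getD never takes the default
    if match_scores.getD best_match 0 = 0 then (none, 0)
    else (some best_match, match_scores.getD best_match 0)

-- ===== PORT B =====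
def recommend_job_alt (user_skills : List String) (job_data : List (String × List String)) : Option String × Int :=
  job_data.foldl
    (fun best p =>
      let match_count := PySem.Set.len (PySem.Set.inter user_skills p.2)
      if best.2 < match_count then (some p.1, match_count) else best)
    (none, 0)

-- ===== PRECONDITION & SPEC =====
-- job_data ≠ [] excludes exactly the inputs where A raises ValueError (max over an empty dict;
-- B returns (None, 0) there instead of raising);
-- the Nodup condition on the keys is a representation constraint, not a narrowing: job_data is a
-- Python dict, whose keys are necessarily distinct, so every dict A accepts satisfies it.
def Pre_recommend_job (user_skills : List String) (job_data : List (String × List String)) : Prop :=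
  job_data ≠ [] ∧ (job_data.map Prod.fst).Nodup
instance (user_skills : List String) (job_data : List (String × List String)) : Decidable (Pre_recommend_job user_skills job_data) := by unfold Pre_recommend_job; infer_instance
def pvWitness_recommend_job : List String × (List (String × List String)) :=
  (["sql", "python"], [("analyst", ["sql", "excel"]), ("cook", ["knife"])])

def Spec_recommend_job (user_skills : List String) (job_data : List (String × List String)) (out : Option String × Int) : Prop := out = recommend_job_alt user_skills job_data
instance (user_skills : List String) (job_data : List (String × List String)) (out : Option String × Int) : Decidable (Spec_recommend_job user_skills job_data out) := by unfold Spec_recommend_job; infer_instance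

-- ===== CLAIM (what is proved, stated in full; the proofs are below) =====
def Claim_equal_recommend_job : Prop := ∀ (user_skills : List String) (job_data : List (String × List String)), Dom_recommend_job user_skills job_data → Pre_recommend_job user_skills job_data → Spec_recommend_job user_skills job_data (recommend_job user_skills job_data)

-- ===== LEMMAS AND PROOFS =====

-- Python's max(xs, key=…) on a non-empty list IS the strict-greater running-argmax loop
theorem pv_max?_cons (val : String → Int) :
    ∀ (ks : List String) (k : String),
    PySem.List.max? (k :: ks) val
      = some (ks.foldl (fun mm x => if val mm < val x then x else mm) k)
  | [], _ => rfl
  | x :: t, k => by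
      have h1 : PySem.List.max? (k :: x :: t) val
          = PySem.List.max? ((if val k < val x then x else k) :: t) val := by
        simp only [PySem.List.max?, List.foldl_cons]
        split <;> rfl
      rw [h1, pv_max?_cons val t _, List.foldl_cons]

-- core invariant: B's (best, count) pair tracks A's running argmax with the zero-count collapse
theorem pv_loopInv (val : String → Int) (sc : String × List String → Int)
    (l : List (String × List String)) :
    ∀ (m : String) (b : Option String × Int),
    (∀ p ∈ l, val p.1 = sc p ∧ 0 ≤ sc p) → 0 ≤ val m →
    b = (if val m = 0 then ((none : Option String), (0 : Int)) else (some m, val m)) →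
    (l.foldl (fun best p => if best.2 < sc p then (some p.1, sc p) else best) b)
      = (let m' := l.foldl (fun mm p => if val mm < val p.1 then p.1 else mm) m;
         if val m' = 0 then (none, 0) else (some m', val m')) := by
  induction l with
  | nil => intro m b _ _ hb; simpa using hb
  | cons p t ih =>
      intro m b hl hm hb
      have hp := hl p (by simp)
      simp only [List.foldl_cons]
      by_cases hlt : val m < val p.1
      · have hb1 : (if b.2 < sc p then (some p.1, sc p) else b)
            = (if val p.1 = 0 then ((none : Option String), (0 : Int)) else (some p.1, val p.1)) := by
          subst hb; rcases hp with ⟨h1, h2⟩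
          split_ifs <;> simp_all <;> omega
        rw [if_pos hlt, hb1]
        exact ih p.1 _ (fun q hq => hl q (by simp [hq])) (by omega) rfl
      · have hb1 : (if b.2 < sc p then (some p.1, sc p) else b)
            = (if val m = 0 then ((none : Option String), (0 : Int)) else (some m, val m)) := by
          subst hb; rcases hp with ⟨h1, h2⟩
          split_ifs <;> simp_all <;> omega
        rw [if_neg hlt, hb1]
        exact ih m _ (fun q hq => hl q (by simp [hq])) hm rfl

-- A's pipeline on an abstract score dict equals B's single pass
theorem pv_main (sc : String × List String → Int)
    (p : String × List String) (t : List (String × List String))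
    (d : PySem.Dict String Int)
    (hkeys : d.keys = (p :: t).map Prod.fst)
    (hval : ∀ q ∈ p :: t, d.getD q.1 0 = sc q)
    (hsc0 : ∀ q, 0 ≤ sc q) :
    (match PySem.List.max? d.keys (fun k => d.getD k 0) with
     | none => ((none : Option String), (0 : Int))
     | some best => if d.getD best 0 = 0 then (none, 0) else (some best, d.getD best 0))
      = (p :: t).foldl (fun best q => if best.2 < sc q then (some q.1, sc q) else best) (none, 0) := by
  have hvp := hval p (by simp)
  have hmax : PySem.List.max? d.keys (fun k => d.getD k 0)
      = some (t.foldl (fun mm q => if d.getD mm 0 < d.getD q.1 0 then q.1 else mm) p.1) := by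
    rw [hkeys, List.map_cons, pv_max?_cons (fun k => d.getD k 0), List.foldl_map]
  rw [hmax]
  have hinv := pv_loopInv (fun k => d.getD k 0) sc t p.1
      (if sc p = 0 then ((none : Option String), (0 : Int)) else (some p.1, sc p))
      (fun q hq => ⟨hval q (by simp [hq]), hsc0 q⟩)
      (by simpa only [hvp] using hsc0 p)
      (by simp only [hvp])
  have hb0 : (if ((none : Option String), (0 : Int)).2 < sc p then (some p.1, sc p)
        else ((none : Option String), (0 : Int)))
      = (if sc p = 0 then ((none : Option String), (0 : Int)) else (some p.1, sc p)) := by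
    have := hsc0 p
    split_ifs <;> first | rfl | omega
  rw [List.foldl_cons, hb0, hinv]

-- ===== VERDICT (by name: the statement is the Claim_ definition above) =====
theorem recommend_job_spec : Claim_equal_recommend_job := by
  intro us jd _ hpre
  obtain ⟨hne, hnd⟩ := hpre
  obtain ⟨p, t, rfl⟩ : ∃ p t, jd = p :: t := by
    cases jd with
    | nil => exact absurd rfl hne
    | cons p t => exact ⟨p, t, rfl⟩
  have hitems : ((p :: t).foldl (fun d q => d.insert q.1 (PySem.Set.len (PySem.Set.inter us q.2))) PySem.Dict.empty).items
      = (p :: t).map (fun q => (q.1, PySem.Set.len (PySem.Set.inter us q.2))) := by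
    have h := PySem.Dict.items_foldl_insert_fresh (p :: t) Prod.fst
      (fun q => PySem.Set.len (PySem.Set.inter us q.2)) PySem.Dict.empty
      (by intro a _; simp [PySem.Dict.contains_empty]) hnd
    simpa using h
  have hkeys : ((p :: t).foldl (fun d q => d.insert q.1 (PySem.Set.len (PySem.Set.inter us q.2))) PySem.Dict.empty).keys
      = (p :: t).map Prod.fst := by
    simp only [PySem.Dict.keys, hitems, List.map_map]
    rfl
  have hval : ∀ q ∈ p :: t,
      ((p :: t).foldl (fun d q => d.insert q.1 (PySem.Set.len (PySem.Set.inter us q.2))) PySem.Dict.empty).getD q.1 0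
        = PySem.Set.len (PySem.Set.inter us q.2) := by
    intro q hq
    exact PySem.Dict.getD_of_mem_items _ (by rw [hitems]; exact List.mem_map_of_mem hq)
      (by rw [hkeys]; exact hnd) 0
  exact pv_main (fun q => PySem.Set.len (PySem.Set.inter us q.2)) p t _ hkeys hval
    (fun q => by simp [PySem.Set.len])
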